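-- pv_equiv track=rewrite | github.com/piotr-kozbial/beusable-assignment | poc.py | solve
-- ===== SOURCE A (Python) =====
-- def solve(clientOffers, freePremium, freeEconomy):
--     sortedOffers = sorted(clientOffers, reverse=True)
--     highOffers = [offer for offer in sortedOffers if offer >= 100]
--     lowOffers =  [offer for offer in sortedOffers if offer < 100]
--
--     highOffersCountTaken = min(len(highOffers), freePremium)
--     lowOffersCountTaken = min(len(lowOffers), freeEconomy)
--     upgradedLowOffersCountTaken = min(len(lowOffers) - lowOffersCountTaken,
--                                       freePremium - highOffersCountTaken)
--
--     highOffersTaken = highOffers[0:highOffersCountTaken]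
--     upgradedLowOffersTaken = lowOffers[0:upgradedLowOffersCountTaken]
--     lowOffersTaken = lowOffers[upgradedLowOffersCountTaken:
--                                (upgradedLowOffersCountTaken + lowOffersCountTaken)]
--
--     return (highOffersCountTaken+upgradedLowOffersCountTaken,
--             sum(highOffersTaken)+sum(upgradedLowOffersTaken),
--             lowOffersCountTaken,
--             sum(lowOffersTaken))
-- ===== SOURCE B (Python) =====
-- # B: no full sort -- partition in one pass, then bounded-buffer partial selection
-- # (keep only the top-k candidates in a small ascending buffer) for each needed rank-prefix sum.
--
-- def _insort(buf, x):
--     # splice x into the ascending buffer, after any equal elements (binary search)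
--     lo, hi = 0, len(buf)
--     while lo < hi:
--         mid = (lo + hi) // 2
--         if buf[mid] <= x:
--             lo = mid + 1
--         else:
--             hi = mid
--     buf[lo:lo] = [x]
--
-- def _topsum(xs, k):
--     # sum of the k largest elements of xs (k >= len(xs) means all; k <= 0 means none),
--     # via a bounded ascending buffer of at most k elements
--     if k <= 0:
--         return 0
--     buf = []  # ascending, holds the largest elements seen so far, len <= k
--     for x in xs:
--         if len(buf) < k:
--             _insort(buf, x)
--         elif x > buf[0]:
--             del buf[0]
--             _insort(buf, x)
--     return sum(buf)
--
-- def solve(clientOffers, freePremium, freeEconomy):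
--     highs = []
--     lows = []
--     for offer in clientOffers:
--         if offer >= 100:
--             highs.append(offer)
--         else:
--             lows.append(offer)
--
--     kHigh = min(len(highs), freePremium)
--     kLow = min(len(lows), freeEconomy)
--     kUp = min(len(lows) - kLow, freePremium - kHigh)
--
--     topUp = _topsum(lows, kUp)
--     return (kHigh + kUp,
--             _topsum(highs, kHigh) + topUp,
--             kLow,
--             _topsum(lows, kUp + kLow) - topUp)
-- ===== Notes on version B (the rewrite author's own statement) =====
-- stated objective: alternative
-- what changed: Replaces the full descending sort plus filtered slices by a one-pass partition into high/low offers and a bounded-buffer partial selection (an ascending buffer of at most k candidates maintained by hand-written binary-search insertion) that yields each rank-prefix sum directly; the economy sum is obtained as a difference of two such top-k sums.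
-- outside the precondition, e.g. on solve([100, 200], -1, 0): A returns (-1, 200, 0, 0), B returns (-1, 0, 0, 0)
import Mathlib
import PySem

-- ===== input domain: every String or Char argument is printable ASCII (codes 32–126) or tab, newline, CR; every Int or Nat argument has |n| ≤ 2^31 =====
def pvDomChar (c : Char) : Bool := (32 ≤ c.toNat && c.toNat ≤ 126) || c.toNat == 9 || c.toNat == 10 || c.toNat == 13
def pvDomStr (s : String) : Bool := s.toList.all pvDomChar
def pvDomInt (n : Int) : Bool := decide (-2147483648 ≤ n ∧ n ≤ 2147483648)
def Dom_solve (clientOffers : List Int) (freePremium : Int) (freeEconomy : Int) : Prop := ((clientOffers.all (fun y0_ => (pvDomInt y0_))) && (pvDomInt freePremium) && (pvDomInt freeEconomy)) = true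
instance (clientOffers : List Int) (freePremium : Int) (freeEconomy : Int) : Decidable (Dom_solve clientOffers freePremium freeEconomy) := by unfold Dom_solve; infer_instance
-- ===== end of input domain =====

-- B replaces A's full descending sort + filtered slices by a one-pass partition and a
-- bounded-buffer partial selection of the top-k elements (objective: alternative algorithm).

-- ===== PORT A =====
def solve (clientOffers : List Int) (freePremium : Int) (freeEconomy : Int) : List Int :=
  let sortedOffers := PySem.List.sorted clientOffers (fun x => x) true
  let highOffers := sortedOffers.filter (fun offer => decide (100 ≤ offer))
  let lowOffers := sortedOffers.filter (fun offer => decide (offer < 100))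
  let highOffersCountTaken := min (PySem.List.len highOffers) freePremium
  let lowOffersCountTaken := min (PySem.List.len lowOffers) freeEconomy
  let upgradedLowOffersCountTaken := min (PySem.List.len lowOffers - lowOffersCountTaken)
                                         (freePremium - highOffersCountTaken)
  let highOffersTaken := PySem.List.slice highOffers (some 0) (some highOffersCountTaken)
  let upgradedLowOffersTaken := PySem.List.slice lowOffers (some 0) (some upgradedLowOffersCountTaken)
  let lowOffersTaken := PySem.List.slice lowOffers (some upgradedLowOffersCountTaken)
                          (some (upgradedLowOffersCountTaken + lowOffersCountTaken))
  [highOffersCountTaken + upgradedLowOffersCountTaken,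
   highOffersTaken.sum + upgradedLowOffersTaken.sum,
   lowOffersCountTaken,
   lowOffersTaken.sum]

-- ===== PORT B =====
-- the binary-search loop of Source B's _insort: first splice position whose element exceeds x
-- (buf[mid] is always in range here since hi ≤ len(buf); ported as getD with default 0)
def findPos (buf : List Int) (x : Int) (lo hi : Nat) : Nat :=
  if h : lo < hi then
    if buf.getD ((lo + hi) / 2) 0 ≤ x then findPos buf x ((lo + hi) / 2 + 1) hi
    else findPos buf x lo ((lo + hi) / 2)
  else lo
termination_by hi - lo
decreasing_by all_goals omega

-- Source B's _insort: splice x into the ascending buffer at the found position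
def insort (buf : List Int) (x : Int) : List Int :=
  buf.take (findPos buf x 0 buf.length) ++ x :: buf.drop (findPos buf x 0 buf.length)

-- one step of Source B's buffer loop body
def bufStep (k : Int) (buf : List Int) (x : Int) : List Int :=
  if PySem.List.len buf < k then insort buf x
  else match buf with
    | [] => [x]                                   -- unreachable: buf has k > 0 elements here
    | b0 :: bs => if b0 < x then insort bs x else b0 :: bs

-- bounded-buffer top-k sum of Source B: buf keeps (ascending) the largest ≤ k elements seen so far
def topsum (xs : List Int) (k : Int) : Int :=
  if k ≤ 0 then 0 else (xs.foldl (bufStep k) []).sum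

def solve_alt (clientOffers : List Int) (freePremium : Int) (freeEconomy : Int) : List Int :=
  let p := clientOffers.foldl
      (fun (acc : List Int × List Int) offer =>
        if 100 ≤ offer then (acc.1 ++ [offer], acc.2) else (acc.1, acc.2 ++ [offer]))
      ([], [])
  let highs := p.1
  let lows := p.2
  let kHigh := min (PySem.List.len highs) freePremium
  let kLow := min (PySem.List.len lows) freeEconomy
  let kUp := min (PySem.List.len lows - kLow) (freePremium - kHigh)
  let topUp := topsum lows kUp
  [kHigh + kUp, topsum highs kHigh + topUp, kLow, topsum lows (kUp + kLow) - topUp]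

-- ===== PRECONDITION & SPEC =====
-- Pre_ excludes negative freePremium/freeEconomy — negative free-offer counts are outside the
-- task's natural domain; there A's Python slices wrap around negative bounds and return
-- accidental counts and sums (e.g. a count of -1), which B does not reproduce.
def Pre_solve (clientOffers : List Int) (freePremium : Int) (freeEconomy : Int) : Prop :=
  0 ≤ freePremium ∧ 0 ≤ freeEconomy
instance (clientOffers : List Int) (freePremium : Int) (freeEconomy : Int) : Decidable (Pre_solve clientOffers freePremium freeEconomy) := by unfold Pre_solve; infer_instance

def pvWitness_solve : List Int × Int × Int := ([120, 50, 200, 99], 1, 1)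

def Spec_solve (clientOffers : List Int) (freePremium : Int) (freeEconomy : Int) (out : List Int) : Prop := out = solve_alt clientOffers freePremium freeEconomy
instance (clientOffers : List Int) (freePremium : Int) (freeEconomy : Int) (out : List Int) : Decidable (Spec_solve clientOffers freePremium freeEconomy out) := by unfold Spec_solve; infer_instance

-- ===== CLAIM (what is proved, stated in full; the proofs are below) =====
def Claim_equal_solve : Prop := ∀ (clientOffers : List Int) (freePremium : Int) (freeEconomy : Int), Dom_solve clientOffers freePremium freeEconomy → Pre_solve clientOffers freePremium freeEconomy → Spec_solve clientOffers freePremium freeEconomy (solve clientOffers freePremium freeEconomy)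

-- ===== LEMMAS AND PROOFS =====

-- proof-side model of insort on a sorted buffer: insertion before the first strictly
-- greater element, by plain recursion
def insertAsc : List Int → Int → List Int
  | [], x => [x]
  | b :: bs, x => if b ≤ x then b :: insertAsc bs x else x :: b :: bs


-- descending Python sort is THE pairwise-(≥) rearrangement (ints: equal keys are equal elements)
theorem sortedDesc_eq_of_perm (l m : List Int) (hp : m.Perm l)
    (hs : m.Pairwise (fun a b => b ≤ a)) : PySem.List.sorted l (fun x => x) true = m := by
  refine List.eq_of_perm_of_sorted (fun a b _ _ h1 h2 => le_antisymm h2 h1)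
    (PySem.List.sorted_pairwise_rev l (fun x => x)) hs
    ((PySem.List.sorted_perm l (fun x => x) true).trans hp.symm)

-- filtering the descending sort = descending sort of the filtered list
theorem filter_sortedDesc (l : List Int) (p : Int → Bool) :
    (PySem.List.sorted l (fun x => x) true).filter p
      = PySem.List.sorted (l.filter p) (fun x => x) true := by
  refine (sortedDesc_eq_of_perm _ _ ?_ ?_).symm
  · exact ((PySem.List.sorted_perm l (fun x => x) true).filter p)
  · exact (PySem.List.sorted_pairwise_rev l (fun x => x)).filter p

theorem insertAsc_perm (b : List Int) (x : Int) : (insertAsc b x).Perm (x :: b) := by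
  induction b with
  | nil => simp [insertAsc]
  | cons y ys ih =>
    simp only [insertAsc]
    split
    · exact (ih.cons y).trans (List.Perm.swap x y ys)
    · exact List.Perm.refl _

theorem insertAsc_length (b : List Int) (x : Int) : (insertAsc b x).length = b.length + 1 :=
  (insertAsc_perm b x).length_eq

theorem insertAsc_mem {b : List Int} {x y : Int} (h : y ∈ insertAsc b x) : y = x ∨ y ∈ b := by
  have := (insertAsc_perm b x).mem_iff.mp h
  simpa using this

theorem insertAsc_sorted {b : List Int} (hb : b.Pairwise (· ≤ ·)) (x : Int) :
    (insertAsc b x).Pairwise (· ≤ ·) := by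
  induction b with
  | nil => simp [insertAsc]
  | cons y ys ih =>
    rw [List.pairwise_cons] at hb
    simp only [insertAsc]
    split
    · rename_i hyx
      refine List.pairwise_cons.mpr ⟨?_, ih hb.2⟩
      intro z hz
      rcases insertAsc_mem hz with rfl | hz
      · exact hyx
      · exact hb.1 z hz
    · rename_i hyx
      have hxy : x < y := lt_of_not_ge hyx
      refine List.pairwise_cons.mpr ⟨?_, List.pairwise_cons.mpr hb⟩
      intro z hz
      rcases List.mem_cons.mp hz with rfl | hz
      · exact le_of_lt hxy
      · exact le_of_lt (lt_of_lt_of_le hxy (hb.1 z hz))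

theorem insertAsc_eq_while (buf : List Int) (x : Int) :
    insertAsc buf x
      = buf.takeWhile (fun b => decide (b ≤ x)) ++ x :: buf.dropWhile (fun b => decide (b ≤ x)) := by
  induction buf with
  | nil => simp [insertAsc]
  | cons y ys ih =>
    by_cases h : y ≤ x <;>
      simp [insertAsc, h, List.takeWhile_cons, List.dropWhile_cons, ih]

-- the binary search lands on c whenever everything left of c is ≤ x and everything from c on is > x
theorem findPos_run (buf : List Int) (x : Int) (c : Nat) (hc : c ≤ buf.length)
    (f1 : ∀ i, i < c → (h : i < buf.length) → buf[i] ≤ x)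
    (f2 : ∀ i, c ≤ i → (h : i < buf.length) → x < buf[i]) :
    ∀ n lo hi, hi - lo ≤ n → lo ≤ c → c ≤ hi → hi ≤ buf.length → findPos buf x lo hi = c := by
  intro n
  induction n with
  | zero =>
    intro lo hi h1 h2 h3 h4
    rw [findPos.eq_def, dif_neg (by omega)]
    omega
  | succ n ih =>
    intro lo hi h1 h2 h3 h4
    rw [findPos.eq_def]
    by_cases hlt : lo < hi
    · rw [dif_pos hlt]
      have hmid : (lo + hi) / 2 < buf.length := by omega
      rw [List.getD_eq_getElem buf 0 hmid]
      by_cases hle : buf[(lo + hi) / 2] ≤ x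
      · rw [if_pos hle]
        have hcc : (lo + hi) / 2 + 1 ≤ c := by
          by_contra hcon
          exact absurd hle (not_le.mpr (f2 _ (by omega) hmid))
        exact ih _ hi (by omega) hcc h3 h4
      · rw [if_neg hle]
        have hcm : c ≤ (lo + hi) / 2 := by
          by_contra hcon
          exact hle (f1 _ (by omega) hmid)
        exact ih lo _ (by omega) h2 hcm (by omega)
    · rw [dif_neg hlt]
      omega

-- on a sorted buffer, Source B's binary-search splice is exactly insertAsc
theorem insort_eq_insertAsc {buf : List Int} (hs : buf.Pairwise (· ≤ ·)) (x : Int) :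
    insort buf x = insertAsc buf x := by
  have hsplit : buf.takeWhile (fun b => decide (b ≤ x)) ++ buf.dropWhile (fun b => decide (b ≤ x)) = buf :=
    List.takeWhile_append_dropWhile
  have hc : (buf.takeWhile (fun b => decide (b ≤ x))).length ≤ buf.length := by
    have := congrArg List.length hsplit
    simp only [List.length_append] at this
    omega
  have htake : buf.take (buf.takeWhile (fun b => decide (b ≤ x))).length
      = buf.takeWhile (fun b => decide (b ≤ x)) := by
    have h0 := List.take_left (l₁ := buf.takeWhile (fun b => decide (b ≤ x)))
      (l₂ := buf.dropWhile (fun b => decide (b ≤ x)))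
    rwa [hsplit] at h0
  have hdrop : buf.drop (buf.takeWhile (fun b => decide (b ≤ x))).length
      = buf.dropWhile (fun b => decide (b ≤ x)) := by
    have h0 := List.drop_left (l₁ := buf.takeWhile (fun b => decide (b ≤ x)))
      (l₂ := buf.dropWhile (fun b => decide (b ≤ x)))
    rwa [hsplit] at h0
  have f1 : ∀ i, i < (buf.takeWhile (fun b => decide (b ≤ x))).length →
      (h : i < buf.length) → buf[i] ≤ x := by
    intro i hi h
    have h1 : i < (buf.take (buf.takeWhile (fun b => decide (b ≤ x))).length).length := by
      simp only [List.length_take]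
      omega
    have h2 : buf[i] ∈ buf.takeWhile (fun b => decide (b ≤ x)) := by
      rw [← htake]
      exact List.getElem_take ▸ List.getElem_mem h1
    simpa using List.mem_takeWhile_imp h2
  have f2 : ∀ i, (buf.takeWhile (fun b => decide (b ≤ x))).length ≤ i →
      (h : i < buf.length) → x < buf[i] := by
    intro i hci h
    have hcl : (buf.takeWhile (fun b => decide (b ≤ x))).length < buf.length := by omega
    have hdw : buf.dropWhile (fun b => decide (b ≤ x)) ≠ [] := by
      rw [← hdrop]
      simp only [ne_eq, List.drop_eq_nil_iff]
      omega
    obtain ⟨d0, ds, hds⟩ : ∃ d0 ds, buf.dropWhile (fun b => decide (b ≤ x)) = d0 :: ds := by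
      cases hq : buf.dropWhile (fun b => decide (b ≤ x)) with
      | nil => exact absurd hq hdw
      | cons a as => exact ⟨a, as, rfl⟩
    have hd0 : x < d0 := by
      have hh := List.head_dropWhile_not (fun b => decide (b ≤ x)) (l := buf) (by simp [hds])
      simp [hds] at hh
      exact hh
    have hdds : buf.drop (buf.takeWhile (fun b => decide (b ≤ x))).length = d0 :: ds := by
      rw [hdrop, hds]
    have hgc : buf[(buf.takeWhile (fun b => decide (b ≤ x))).length] = d0 := by
      have h1 : (buf.drop (buf.takeWhile (fun b => decide (b ≤ x))).length)[0]?
          = buf[(buf.takeWhile (fun b => decide (b ≤ x))).length + 0]? := List.getElem?_drop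
      rw [hdds, List.getElem?_eq_getElem
        (by omega : (List.takeWhile (fun b => decide (b ≤ x)) buf).length + 0 < buf.length)] at h1
      simp at h1
      omega
    have hxc : x < buf[(buf.takeWhile (fun b => decide (b ≤ x))).length] := by
      rw [hgc]
      exact hd0
    rcases eq_or_lt_of_le hci with heq | hlt
    · exact heq ▸ hxc
    · exact lt_of_lt_of_le hxc (List.pairwise_iff_getElem.mp hs _ i hcl h hlt)
  have hfp := findPos_run buf x (buf.takeWhile (fun b => decide (b ≤ x))).length hc f1 f2
    buf.length 0 buf.length (by omega) (by omega) hc le_rfl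
  rw [insort, hfp, htake, hdrop, insertAsc_eq_while]

-- the loop invariant of Source B's bounded buffer: after any prefix p, the buffer is an ascending
-- list of min(k, |p|) elements, and the rest of p (rest) lies below every buffer element
def BufInv (k : Nat) (buf p : List Int) : Prop :=
  buf.Pairwise (· ≤ ·) ∧ buf.length = min k p.length ∧
    ∃ rest, p.Perm (buf ++ rest) ∧ ∀ r ∈ rest, ∀ b ∈ buf, r ≤ b

theorem topsum_step (k : Int) (hk : 0 < k) (buf p : List Int) (x : Int)
    (h : BufInv k.toNat buf p) : BufInv k.toNat (bufStep k buf x) (p ++ [x]) := by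
  obtain ⟨hsort, hlen, rest, hperm, hbound⟩ := h
  rw [bufStep.eq_def, PySem.List.len_eq]
  by_cases hfull : (buf.length : Int) < k
  · -- buffer not yet full: rest is empty, just insert
    rw [if_pos hfull, insort_eq_insertAsc hsort x]
    have hlt : buf.length < k.toNat := by omega
    have hplen : p.length = buf.length := by omega
    have hrest : rest = [] := by
      have hle := hperm.length_eq
      simp only [List.length_append] at hle
      exact List.eq_nil_of_length_eq_zero (by omega)
    subst hrest
    refine ⟨insertAsc_sorted hsort x, ?_, [], ?_, by simp⟩
    · rw [insertAsc_length]; simp; omega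
    · have h1 : p.Perm buf := by simpa using hperm
      simp only [List.append_nil]
      exact ((h1.append_right [x]).trans (List.perm_append_singleton x buf)).trans
        (insertAsc_perm buf x).symm
  · rw [if_neg hfull]
    have hbk : buf.length = k.toNat := by omega
    match buf, hsort, hbk, hbound, hperm with
    | [], _, hbk, _, _ => exact absurd hbk (by simp only [List.length_nil]; omega)
    | b0 :: bs, hsort, hbk, hbound, hperm =>
      rw [List.pairwise_cons] at hsort
      have hred : (match b0 :: bs with
          | [] => [x]
          | b0 :: bs => if b0 < x then insort bs x else b0 :: bs)
          = if b0 < x then insort bs x else b0 :: bs := rfl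
      rw [hred]
      by_cases hx : b0 < x
      · rw [if_pos hx, insort_eq_insertAsc hsort.2 x]
        refine ⟨insertAsc_sorted hsort.2 x, ?_, b0 :: rest, ?_, ?_⟩
        · have hple := hperm.length_eq
          rw [insertAsc_length]
          simp only [List.length_append, List.length_cons] at hple
          simp at hbk ⊢
          omega
        · exact (((((hperm.append_right [x]).trans
            (List.perm_append_singleton x _)).trans
            (List.Perm.swap b0 x _)).trans
            (List.Perm.cons b0 (((insertAsc_perm bs x).symm).append_right rest))).trans
            List.perm_middle.symm)
        · intro r hr b hb
          rcases insertAsc_mem hb with rfl | hb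
          · rcases List.mem_cons.mp hr with rfl | hr
            · exact le_of_lt hx
            · exact le_of_lt (lt_of_le_of_lt (hbound r hr b0 (by simp)) hx)
          · rcases List.mem_cons.mp hr with rfl | hr
            · exact hsort.1 b hb
            · exact hbound r hr b (by simp [hb])
      · rw [if_neg hx]
        have hxb : x ≤ b0 := le_of_not_gt hx
        refine ⟨List.pairwise_cons.mpr hsort, ?_, x :: rest, ?_, ?_⟩
        · have hple := hperm.length_eq
          simp only [List.length_append, List.length_cons] at hple
          simp at hbk ⊢
          omega
        · refine (hperm.append_right [x]).trans ?_
          rw [List.append_assoc]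
          exact List.Perm.append_left _ (List.perm_append_singleton x rest)
        · intro r hr b hb
          rcases List.mem_cons.mp hr with rfl | hr
          · rcases List.mem_cons.mp hb with rfl | hb
            · exact hxb
            · exact le_trans hxb (hsort.1 b hb)
          · exact hbound r hr b hb

theorem topsum_inv (k : Int) (hk : 0 < k) (xs : List Int) :
    BufInv k.toNat (xs.foldl (bufStep k) []) xs := by
  induction xs using List.reverseRecOn with
  | nil => exact ⟨by simp, by simp, [], by simp, by simp⟩
  | append_singleton p x ih =>
    rw [List.foldl_append, List.foldl_cons, List.foldl_nil]
    exact topsum_step k hk _ p x ih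

-- the buffer's sum is the sum of the k largest = sum of the first k of the descending sort
theorem sum_of_bufInv {k : Nat} {buf l : List Int} (h : BufInv k buf l) :
    buf.sum = ((PySem.List.sorted l (fun x => x) true).take k).sum := by
  obtain ⟨hsort, hlen, rest, hperm, hbound⟩ := h
  have hsd : PySem.List.sorted l (fun x => x) true
      = buf.reverse ++ PySem.List.sorted rest (fun x => x) true := by
    refine sortedDesc_eq_of_perm _ _ ?_ ?_
    · exact ((List.Perm.append_left buf.reverse
        (PySem.List.sorted_perm rest (fun x => x) true)).trans
        ((List.reverse_perm buf).append_right rest)).trans hperm.symm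
    · rw [List.pairwise_append]
      refine ⟨by rw [List.pairwise_reverse]; exact hsort, PySem.List.sorted_pairwise_rev _ _, ?_⟩
      intro a ha b hb
      exact hbound b ((PySem.List.mem_sorted _ _ _ _).mp hb) a (by simpa using ha)
  rw [hsd]
  by_cases hc : k ≤ l.length
  · have hbl : buf.reverse.length = k := by simp; omega
    rw [List.take_append_of_le_length (by omega), List.take_of_length_le (by omega)]
    simp
  · have hrest : rest = [] := by
      have := hperm.length_eq
      simp only [List.length_append] at this
      exact List.eq_nil_of_length_eq_zero (by omega)
    subst hrest
    have : PySem.List.sorted ([] : List Int) (fun x => x) true = [] := by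
      have := (PySem.List.sorted_perm ([] : List Int) (fun x => x) true).length_eq
      exact List.eq_nil_of_length_eq_zero (by simpa using this)
    rw [this, List.append_nil, List.take_of_length_le (by simp; omega)]
    simp

theorem topsum_eq (l : List Int) (k : Int) (hk : 0 ≤ k) :
    topsum l k = ((PySem.List.sorted l (fun x => x) true).take k.toNat).sum := by
  by_cases h0 : k ≤ 0
  · have : k = 0 := le_antisymm h0 hk
    subst this
    simp [topsum]
  · have h0' : 0 < k := lt_of_not_ge h0
    rw [topsum, if_neg (by omega)]
    exact sum_of_bufInv (topsum_inv k h0' l)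

-- B's one-pass partition builds exactly the two filters
theorem partition_foldl (l : List Int) (h0 l0 : List Int) :
    l.foldl (fun (acc : List Int × List Int) offer =>
        if 100 ≤ offer then (acc.1 ++ [offer], acc.2) else (acc.1, acc.2 ++ [offer])) (h0, l0)
      = (h0 ++ l.filter (fun offer => decide (100 ≤ offer)),
         l0 ++ l.filter (fun offer => decide (offer < 100))) := by
  induction l generalizing h0 l0 with
  | nil => simp
  | cons y ys ih =>
    by_cases hy : (100 : Int) ≤ y
    · simp [List.foldl_cons, hy, ih, not_lt.mpr hy]
    · simp [List.foldl_cons, hy, ih, lt_of_not_ge hy]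

theorem sum_take_sub (l : List Int) (a c : Nat) :
    (l.take (a + c)).sum - (l.take a).sum = ((l.drop a).take c).sum := by
  rw [List.take_add, List.sum_append]; ring

-- ===== VERDICT (by name: the statement is the Claim_ definition above) =====
theorem solve_spec : Claim_equal_solve := by
  intro co fP fE _ hpre
  obtain ⟨hP, hE⟩ := hpre
  unfold Spec_solve solve solve_alt
  rw [partition_foldl co [] []]
  simp only [List.nil_append]
  rw [filter_sortedDesc co (fun offer => decide (100 ≤ offer)),
      filter_sortedDesc co (fun offer => decide (offer < 100))]
  set highs := co.filter (fun offer => decide (100 ≤ offer)) with hh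
  set lows := co.filter (fun offer => decide (offer < 100)) with hl
  rw [PySem.List.len_eq, PySem.List.len_eq, PySem.List.length_sorted, PySem.List.length_sorted,
      ← PySem.List.len_eq, ← PySem.List.len_eq]
  set kH := min (PySem.List.len highs) fP with hkH
  set kL := min (PySem.List.len lows) fE with hkL
  set kU := min (PySem.List.len lows - kL) (fP - kH) with hkU
  have hlenH : PySem.List.len highs = (highs.length : Int) := PySem.List.len_eq _
  have hlenL : PySem.List.len lows = (lows.length : Int) := PySem.List.len_eq _
  have hkH0 : 0 ≤ kH := by rw [hkH, hlenH]; positivity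
  have hkL0 : 0 ≤ kL := by rw [hkL, hlenL]; positivity
  have hkU0 : 0 ≤ kU := by
    rw [hkU]
    refine le_min ?_ ?_
    · rw [hlenL]; simp [hkL]
    · simp [hkH]
  rw [PySem.List.slice_zero_start, PySem.List.slice_zero_start,
      PySem.List.slice_to _ hkH0, PySem.List.slice_to _ hkU0,
      PySem.List.slice_toNat _ hkU0 (by omega),
      topsum_eq highs kH hkH0, topsum_eq lows kU hkU0, topsum_eq lows (kU + kL) (by omega)]
  have htn : (kU + kL).toNat = kU.toNat + kL.toNat := by omega
  have htn2 : (kU + kL).toNat - kU.toNat = kL.toNat := by omega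
  rw [htn2, htn, ← sum_take_sub]
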